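-- pv_equiv track=rewrite | github.com/daniel-reich/ubiquitous-fiesta | 5uMJmbN2uihcyEu75_14.py | weekly_salary
-- ===== SOURCE A (Python) =====
-- def weekly_salary(hours):
--   res = 0
--   for i in range(0,len(hours)):
--     day = 0
--     if hours[i] <= 8:
--       day += hours[i] * 10
--     else:
--       day += 8 * 10 + (hours[i] - 8) * 15
--
--     if i > 4:
--       day *= 2
--     res += day
--   return res
-- ===== SOURCE B (Python) =====
-- def weekly_salary(hours):
--     # Pay of a block of days, branch-free: 10 per hour plus 5 extra per overtime hour.
--     def pay(hs):
--         return 10 * sum(hs) + 5 * sum(max(h - 8, 0) for h in hs)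
--     # Doubling the weekend = paying the whole week once, then the weekend again.
--     return pay(hours) + pay(hours[5:])
-- ===== Notes on version B (the rewrite author's own statement) =====
-- stated objective: alternative
-- what changed: Replaces the indexed loop with per-day branch and i>4 doubling by a branch-free arithmetic reformulation: block pay = 10*sum(hours) + 5*sum(overtime), and the result is pay(whole week) + pay(weekend slice), so neither a per-day conditional nor an index comparison remains.
import Mathlib
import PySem

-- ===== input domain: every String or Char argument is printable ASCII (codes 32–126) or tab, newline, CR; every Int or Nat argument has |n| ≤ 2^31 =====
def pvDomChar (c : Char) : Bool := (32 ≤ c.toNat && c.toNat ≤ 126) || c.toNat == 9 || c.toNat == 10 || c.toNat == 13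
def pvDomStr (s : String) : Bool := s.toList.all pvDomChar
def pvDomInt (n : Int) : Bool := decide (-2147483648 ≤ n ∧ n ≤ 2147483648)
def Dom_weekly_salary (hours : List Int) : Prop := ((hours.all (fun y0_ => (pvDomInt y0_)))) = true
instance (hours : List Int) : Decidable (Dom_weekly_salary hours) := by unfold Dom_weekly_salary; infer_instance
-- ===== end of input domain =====

-- B replaces A's indexed loop (per-day branch, i>4 doubling) by a branch-free arithmetic
-- reformulation: block pay = 10*sum + 5*overtime-sum, result = pay(week) + pay(weekend slice).

-- ===== PORT A =====
-- literal port of A's indexed loop; indices from range(0, len(hours)) are always in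
-- range, so pyGetD with default 0 is exact here
def weekly_salary (hours : List Int) : Int :=
  (PySem.List.pyRange 0 (hours.length : Int) 1).foldl
    (fun res i =>
      let day : Int :=
        if PySem.List.pyGetD hours i 0 ≤ 8 then
          0 + PySem.List.pyGetD hours i 0 * 10
        else
          0 + (8 * 10 + (PySem.List.pyGetD hours i 0 - 8) * 15)
      let day := if i > 4 then day * 2 else day
      res + day) 0

-- ===== PORT B =====
def pay (hs : List Int) : Int :=
  10 * hs.sum + 5 * (hs.map (fun h => max (h - 8) 0)).sum

def weekly_salary_alt (hours : List Int) : Int :=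
  pay hours + pay (hours.drop 5)    -- hours[5:] is List.drop 5

-- ===== PRECONDITION & SPEC =====
def Spec_weekly_salary (hours : List Int) (out : Int) : Prop := out = weekly_salary_alt hours
instance (hours : List Int) (out : Int) : Decidable (Spec_weekly_salary hours out) := by unfold Spec_weekly_salary; infer_instance

-- ===== CLAIM (what is proved, stated in full; the proofs are below) =====
def Claim_equal_weekly_salary : Prop := ∀ (hours : List Int), Dom_weekly_salary hours → Spec_weekly_salary hours (weekly_salary hours)

-- ===== LEMMAS AND PROOFS =====

-- proof-side per-day pay, the common value of both programs' per-day contributions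
def day_pay (h : Int) : Int := 10 * h + 5 * max (h - 8) 0

-- A's loop as a fold over enumerate
theorem weekly_salary_eq_enum (hours : List Int) :
    weekly_salary hours =
      (PySem.List.enumerate hours 0).foldl
        (fun res p =>
          res + (if p.1 > 4 then day_pay p.2 * 2 else day_pay p.2)) 0 := by
  unfold weekly_salary
  rw [PySem.List.enumerate_eq_map_pyRange hours 0, List.foldl_map]
  simp only [PySem.List.len_eq]
  apply PySem.List.foldl_congr_mem
  intro acc i hi
  have hb := (PySem.List.mem_pyRange_one).1 hi
  unfold day_pay
  split_ifs <;> omega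

theorem enum_fold_weekday (xs : List Int) (init : Int) (hlen : xs.length ≤ 5) :
    (PySem.List.enumerate xs 0).foldl
        (fun res p =>
          res + (if p.1 > 4 then day_pay p.2 * 2 else day_pay p.2)) init
      = init + (xs.map day_pay).sum := by
  rw [PySem.List.foldl_congr_mem (g := fun res p => res + day_pay p.2)]
  · rw [PySem.List.foldl_add]
    have h : (PySem.List.enumerate xs 0).map (fun p => day_pay p.2)
        = ((PySem.List.enumerate xs 0).map (·.2)).map day_pay := by
      rw [List.map_map]; rfl
    rw [h, PySem.List.map_snd_enumerate]
  · intro acc p hp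
    obtain ⟨k, hk, rfl⟩ := (PySem.List.mem_enumerate_iff xs 0 p).1 hp
    have hlt : ¬ (4 < k) := by omega
    simp [hlt]

theorem enum_fold_weekend (xs : List Int) (s init : Int) (hs : xs = [] ∨ 5 ≤ s) :
    (PySem.List.enumerate xs s).foldl
        (fun res p =>
          res + (if p.1 > 4 then day_pay p.2 * 2 else day_pay p.2)) init
      = init + 2 * (xs.map day_pay).sum := by
  rcases hs with rfl | hs
  · simp [PySem.List.enumerate]
  rw [PySem.List.foldl_congr_mem (g := fun res p => res + day_pay p.2 * 2)]
  · rw [PySem.List.foldl_add]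
    have h : (PySem.List.enumerate xs s).map (fun p => day_pay p.2 * 2)
        = (((PySem.List.enumerate xs s).map (·.2)).map day_pay).map (· * 2) := by
      rw [List.map_map, List.map_map]; rfl
    rw [h, PySem.List.map_snd_enumerate]
    have h2 : ∀ (l : List Int), (l.map (· * 2)).sum = 2 * l.sum := by
      intro l; induction l with
      | nil => simp
      | cons a t ih => simp [ih]; ring
    rw [h2]
  · intro acc p hp
    obtain ⟨k, hk, rfl⟩ := (PySem.List.mem_enumerate_iff xs s p).1 hp
    have hgt : ((4 : Int) < s + (k : Int)) := by omega
    simp [hgt]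

-- B's block pay equals the sum of per-day pays
theorem pay_eq_sum_day_pay (xs : List Int) : pay xs = (xs.map day_pay).sum := by
  induction xs with
  | nil => simp [pay]
  | cons a t ih =>
    rw [List.map_cons, List.sum_cons, ← ih]
    unfold pay day_pay
    simp only [List.sum_cons, List.map_cons]
    omega

-- ===== VERDICT (by name: the statement is the Claim_ definition above) =====
theorem weekly_salary_spec : Claim_equal_weekly_salary := by
  intro hours _
  unfold Spec_weekly_salary weekly_salary_alt
  rw [weekly_salary_eq_enum, pay_eq_sum_day_pay, pay_eq_sum_day_pay]
  conv_lhs => rw [← List.take_append_drop 5 hours]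
  rw [PySem.List.enumerate_append, List.foldl_append]
  rw [enum_fold_weekday _ _ (by simp)]
  rw [enum_fold_weekend _ _ _ ?_]
  · have hsplit : (hours.map day_pay).sum
        = ((hours.take 5).map day_pay).sum + ((hours.drop 5).map day_pay).sum := by
      rw [← List.sum_take_add_sum_drop (hours.map day_pay) 5, List.map_take, List.map_drop]
    rw [hsplit]; ring
  · by_cases h5 : 5 ≤ hours.length
    · right; simp [List.length_take]; omega
    · left; exact List.drop_eq_nil_of_le (by omega)
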